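-- pv_equiv track=rewrite | github.com/renxida/iseedeaduops-poc | lfence-bypass/generate_stripes.py | gen_zebra
-- ===== SOURCE A (Python) =====
-- DSB_NSETS=32
--
-- def gen_zebra(dsb_sets, n_ways):
--     jumps = []
--     for w in range(n_ways):
--         for i in range(len(dsb_sets)):
--
--             s = dsb_sets[i]
--
--             if(w == 0 and i == 0):
--                 if(s != 0):
--                     jumps.append(s - 0) # get to the first one from beginning of loop
--                 continue
--
--             jump = dsb_sets[i] - dsb_sets[i-1]
--             if(i == 0):
--                 jump += DSB_NSETS # go to the nest iteration if w just increased
--             jumps.append(jump)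
--
--     return jumps
-- ===== SOURCE B (Python) =====
-- DSB_NSETS = 32
--
-- def gen_zebra(dsb_sets, n_ways):
--     # Flatten to absolute positions, then take consecutive differences.
--     positions = [w * DSB_NSETS + s for w in range(n_ways) for s in dsb_sets]
--     if not positions:
--         return []
--     head = positions[0]
--     jumps = [head] if head != 0 else []
--     jumps += [b - a for a, b in zip(positions, positions[1:])]
--     return jumps
-- ===== Notes on version B (the rewrite author's own statement) =====
-- stated objective: idiomatic
-- what changed: B flattens the stripe into one absolute-position list (w*DSB_NSETS + s) and emits consecutive differences with a zip, replacing A's nested way/index loops and the dsb_sets[i-1] negative-index wrap trick.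
import Mathlib
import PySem

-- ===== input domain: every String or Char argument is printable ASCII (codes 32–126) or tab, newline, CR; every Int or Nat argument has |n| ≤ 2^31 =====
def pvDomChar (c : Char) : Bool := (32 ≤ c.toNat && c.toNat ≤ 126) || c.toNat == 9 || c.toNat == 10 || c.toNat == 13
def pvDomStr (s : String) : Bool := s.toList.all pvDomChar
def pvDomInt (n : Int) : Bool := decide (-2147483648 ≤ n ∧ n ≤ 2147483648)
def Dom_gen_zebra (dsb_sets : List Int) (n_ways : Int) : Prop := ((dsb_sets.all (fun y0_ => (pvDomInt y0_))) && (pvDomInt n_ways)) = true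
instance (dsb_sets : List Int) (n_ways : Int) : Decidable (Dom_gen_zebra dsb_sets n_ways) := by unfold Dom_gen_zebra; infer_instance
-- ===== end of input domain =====

-- B flattens the stripe to one absolute-position list (w*32 + s) and takes consecutive differences (idiomatic; same cost as A).

-- ===== PORT A =====
-- the inner 'for i in range(len(dsb_sets))' loop of A, named so the proofs can refer to it
def genZebraInner (dsb_sets : List Int) (w : Int) (jumps : List Int) : List Int :=
  (PySem.List.pyRange 0 (PySem.List.len dsb_sets) 1).foldl (fun jumps i =>
    let s := PySem.List.pyGetD dsb_sets i 0
    if w = 0 ∧ i = 0 then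
      (if s ≠ 0 then jumps ++ [s - 0] else jumps)
    else
      let jump := PySem.List.pyGetD dsb_sets i 0 - PySem.List.pyGetD dsb_sets (i - 1) 0
      let jump := if i = 0 then jump + 32 else jump
      jumps ++ [jump]) jumps

def gen_zebra (dsb_sets : List Int) (n_ways : Int) : List Int :=
  (PySem.List.pyRange 0 n_ways 1).foldl (fun jumps w => genZebraInner dsb_sets w jumps) []

-- ===== PORT B =====
def gen_zebra_alt (dsb_sets : List Int) (n_ways : Int) : List Int :=
  let positions := (PySem.List.pyRange 0 n_ways 1).flatMap (fun w => dsb_sets.map (fun s => w * 32 + s))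
  match positions with
  | [] => []
  | head :: rest =>
    (if head ≠ 0 then [head] else []) ++ (((head :: rest).zip rest).map (fun ab => ab.2 - ab.1))

-- ===== PRECONDITION & SPEC =====
def Spec_gen_zebra (dsb_sets : List Int) (n_ways : Int) (out : List Int) : Prop := out = gen_zebra_alt dsb_sets n_ways
instance (dsb_sets : List Int) (n_ways : Int) (out : List Int) : Decidable (Spec_gen_zebra dsb_sets n_ways out) := by unfold Spec_gen_zebra; infer_instance

-- ===== CLAIM (what is proved, stated in full; the proofs are below) =====
def Claim_equal_gen_zebra : Prop := ∀ (dsb_sets : List Int) (n_ways : Int), Dom_gen_zebra dsb_sets n_ways → Spec_gen_zebra dsb_sets n_ways (gen_zebra dsb_sets n_ways)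

-- ===== LEMMAS AND PROOFS =====

-- running consecutive differences against a previous value
def pvAdj : Int → List Int → List Int
  | _, [] => []
  | prev, x :: xs => (x - prev) :: pvAdj x xs

-- block of jumps A emits for the first way (w = 0)
def pvBlock0 (ds : List Int) : List Int :=
  match ds with
  | [] => []
  | s :: t => (if s ≠ 0 then [s] else []) ++ pvAdj s t

-- block of jumps A emits for every later way (w ≥ 1)
def pvBlockW (ds : List Int) : List Int := pvAdj (ds.getLastD 0 - 32) ds

theorem pvAdj_zip (xs : List Int) (x : Int) :
    ((x :: xs).zip xs).map (fun ab => ab.2 - ab.1) = pvAdj x xs := by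
  induction xs generalizing x with
  | nil => rfl
  | cons y ys ih =>
    simp only [List.zip_cons_cons, List.map_cons, pvAdj]
    rw [ih y]

theorem pvAdj_append (xs ys : List Int) (prev : Int) :
    pvAdj prev (xs ++ ys) = pvAdj prev xs ++ pvAdj (xs.getLastD prev) ys := by
  induction xs generalizing prev with
  | nil => rfl
  | cons a t ih => simp only [List.cons_append, pvAdj, ih a, List.getLastD_cons]

theorem pvAdj_shift (xs : List Int) (prev c : Int) :
    pvAdj prev (xs.map (fun x => c + x)) = pvAdj (prev - c) xs := by
  induction xs generalizing prev with
  | nil => rfl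
  | cons a t ih =>
    simp only [List.map_cons, pvAdj, ih (c + a)]
    rw [show c + a - c = a from by ring, show c + a - prev = a - (prev - c) from by ring]

theorem pvAdj_range (t : List Int) (x : Int) :
    (List.range t.length).map (fun k => (x :: t).getD (k+1) 0 - (x :: t).getD k 0) = pvAdj x t := by
  induction t generalizing x with
  | nil => rfl
  | cons y ys ih =>
    simp only [List.length_cons, List.range_succ_eq_map, List.map_cons, List.map_map]
    refine congrArg₂ _ (by simp) ?_
    rw [← ih y]
    rfl

theorem pvGetLastD_map (f : Int → Int) (s : Int) (t : List Int) (d : Int) :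
    ((s :: t).map f).getLastD d = f (t.getLastD s) := by
  induction t generalizing s with
  | nil => rfl
  | cons y ys ih => simp only [List.map_cons, List.getLastD_cons] at *; exact ih y

theorem pvTail (s : Int) (t : List Int) :
    (List.range t.length).map (fun k : Nat =>
      PySem.List.pyGetD (s :: t) (↑(k+1)) 0 - PySem.List.pyGetD (s :: t) ((↑(k+1) : Int) - 1) 0) = pvAdj s t := by
  rw [← pvAdj_range t s]
  refine List.map_congr_left (fun k hk => ?_)
  have h1 : ((↑(k+1) : Int)) - 1 = (↑k : Int) := by push_cast; ring
  rw [h1, PySem.List.pyGetD_natCast, PySem.List.pyGetD_natCast]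

theorem pvLastNeg (s : Int) (t : List Int) :
    PySem.List.pyGetD (s :: t) (-1) 0 = (s :: t).getLastD 0 := by
  rw [PySem.List.pyGetD_neg_one (s :: t) 0 (by simp), List.getLast_eq_getLastD, List.getLastD_cons]

theorem pvMapW (ds : List Int) :
    (List.range ds.length).map (fun y : Nat =>
      if (↑y : Int) = 0 then PySem.List.pyGetD ds (↑y) 0 - PySem.List.pyGetD ds ((↑y : Int) - 1) 0 + 32
      else PySem.List.pyGetD ds (↑y) 0 - PySem.List.pyGetD ds ((↑y : Int) - 1) 0) = pvBlockW ds := by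
  cases ds with
  | nil => rfl
  | cons s t =>
    rw [List.length_cons, List.range_succ_eq_map]
    simp only [List.map_cons, List.map_map]
    refine congrArg₂ _ ?_ ?_
    · rw [if_pos (by simp)]
      simp only [Nat.cast_zero, zero_sub]
      rw [PySem.List.pyGetD_zero_cons, pvLastNeg]
      show _ = (s :: t).getD 0 0 - ((s :: t).getLastD 0 - 32)
      simp
      ring
    · refine Eq.trans ?_ (pvTail s t)
      refine List.map_congr_left (fun k hk => ?_)
      simp only [Function.comp_apply]
      rw [if_neg (by exact_mod_cast Nat.succ_ne_zero k)]
  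
theorem pvFlat0 (ds : List Int) :
    (List.range ds.length).flatMap (fun y : Nat =>
      if (↑y : Int) = 0 then (if PySem.List.pyGetD ds (↑y) 0 ≠ 0 then [PySem.List.pyGetD ds (↑y) 0] else [])
      else [PySem.List.pyGetD ds (↑y) 0 - PySem.List.pyGetD ds ((↑y : Int) - 1) 0]) = pvBlock0 ds := by
  cases ds with
  | nil => rfl
  | cons s t =>
    rw [List.length_cons, List.range_succ_eq_map]
    simp only [List.flatMap_cons, List.flatMap_map, Nat.succ_eq_add_one]
    refine congrArg₂ _ ?_ ?_
    · rw [if_pos (by simp)]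
      simp only [Nat.cast_zero]
      rw [PySem.List.pyGetD_zero_cons]
    · have h : ∀ k : Nat, (if (↑(k+1) : Int) = 0 then (if PySem.List.pyGetD (s :: t) (↑(k+1)) 0 ≠ 0 then [PySem.List.pyGetD (s :: t) (↑(k+1)) 0] else [])
          else [PySem.List.pyGetD (s :: t) (↑(k+1)) 0 - PySem.List.pyGetD (s :: t) ((↑(k+1) : Int) - 1) 0]) =
          [PySem.List.pyGetD (s :: t) (↑(k+1)) 0 - PySem.List.pyGetD (s :: t) ((↑(k+1) : Int) - 1) 0] := by
        intro k
        rw [if_neg (by exact_mod_cast Nat.succ_ne_zero k)]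
      simp only [h]
      rw [← List.map_eq_flatMap]
      exact pvTail s t

theorem genZebraInner_eq (ds : List Int) (w : Int) (jumps : List Int) :
    genZebraInner ds w jumps = jumps ++ (if w = 0 then pvBlock0 ds else pvBlockW ds) := by
  unfold genZebraInner
  rw [PySem.List.len_eq, PySem.List.pyRange_one]
  simp only [Int.sub_zero, List.foldl_map, Int.zero_add, Int.toNat_natCast]
  by_cases hw : w = 0
  · subst hw
    simp only [true_and, if_true]
    rw [PySem.List.foldl_congr_mem _ _
      (fun (x : List Int) (y : Nat) => x ++ (if (↑y:Int) = 0 then (if PySem.List.pyGetD ds (↑y) 0 ≠ 0 then [PySem.List.pyGetD ds (↑y) 0] else [])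
          else [PySem.List.pyGetD ds (↑y) 0 - PySem.List.pyGetD ds ((↑y:Int) - 1) 0])) _
      (by intro acc y _; split_ifs <;> simp_all)]
    rw [PySem.List.foldl_append_eq_flatMap, pvFlat0 ds]
  · simp only [hw, false_and, if_false]
    rw [PySem.List.foldl_append_singleton_eq_map, pvMapW ds]

theorem pvChain (s : Int) (t : List Int) (m : Nat) : ∀ (c : Int),
    pvAdj (c * 32 + (s :: t).getLastD 0)
        ((List.range m).flatMap (fun j : Nat => (s :: t).map (fun x => (c + 1 + ↑j) * 32 + x))) =
      (List.range m).flatMap (fun _ => pvBlockW (s :: t)) := by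
  induction m with
  | zero => intro c; rfl
  | succ m ih =>
    intro c
    rw [List.range_succ_eq_map, List.flatMap_cons, List.flatMap_map, List.flatMap_cons, List.flatMap_map]
    have hshape : (fun x => (c + 1 + (↑(0:Nat) : Int)) * 32 + x) = (fun x => (c + 1) * 32 + x) := by
      funext x; push_cast; ring
    rw [hshape, pvAdj_append]
    refine congrArg₂ _ ?_ ?_
    · rw [pvAdj_shift]
      show pvAdj _ (s :: t) = pvBlockW (s :: t)
      rw [show c * 32 + (s :: t).getLastD 0 - (c + 1) * 32 = (s :: t).getLastD 0 - 32 from by ring]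
      rfl
    · rw [show ((s :: t).map (fun x => (c + 1) * 32 + x)).getLastD (c * 32 + (s :: t).getLastD 0)
            = (c + 1) * 32 + (s :: t).getLastD 0 from by rw [pvGetLastD_map, List.getLastD_cons]]
      have hfun : (fun (j : Nat) => (s :: t).map (fun x => (c + 1 + (↑(j+1) : Int)) * 32 + x))
          = (fun (j : Nat) => (s :: t).map (fun x => ((c + 1) + 1 + (↑j : Int)) * 32 + x)) := by
        funext j; congr 1; funext x; push_cast; ring
      rw [show (fun (j : Nat) => _) = _ from hfun]
      exact ih (c + 1)

theorem gen_zebra_spec : Claim_equal_gen_zebra := by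
  intro ds n _
  unfold Spec_gen_zebra gen_zebra gen_zebra_alt
  have hfun : (fun (j : List Int) (w : Int) => genZebraInner ds w j)
      = fun j w => j ++ (if w = 0 then pvBlock0 ds else pvBlockW ds) := by
    funext j w; exact genZebraInner_eq ds w j
  rw [hfun, PySem.List.foldl_append_eq_flatMap, List.nil_append]
  by_cases hn : n ≤ 0
  · rw [PySem.List.pyRange_one_eq_nil hn]
    rfl
  · rw [PySem.List.pyRange_one]
    have hm : (n - 0).toNat = (n.toNat - 1) + 1 := by omega
    rw [hm, List.range_succ_eq_map]
    simp only [List.flatMap_cons, List.flatMap_map, List.map_cons, List.map_map, Function.comp_def,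
      Nat.cast_zero, zero_add, Nat.succ_eq_add_one, if_true]
    cases ds with
    | nil =>
      have hz : List.flatMap (fun _ : Nat => ([] : List Int)) (List.range (n.toNat - 1)) = [] := by simp
      simp [pvBlock0, pvBlockW, pvAdj]
      rw [hz]
    | cons s t =>
      have hmap0 : (s :: t).map (fun x => (0 : Int) * 32 + x) = s :: t := by
        simp
      rw [hmap0]
      have hA2 : (fun j : Nat => if (↑(j+1) : Int) = 0 then pvBlock0 (s :: t) else pvBlockW (s :: t))
          = fun _ : Nat => pvBlockW (s :: t) := by
        funext j; rw [if_neg (by exact_mod_cast Nat.succ_ne_zero j)]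
      rw [hA2]
      have hB2 : (fun j : Nat => (s :: t).map (fun x => (↑(j+1) : Int) * 32 + x))
          = fun j : Nat => (s :: t).map (fun x => ((0:Int) + 1 + ↑j) * 32 + x) := by
        funext j; congr 1; funext x; push_cast; ring
      rw [hB2]
      rw [List.cons_append]
      show pvBlock0 (s :: t) ++ _ = (if s ≠ 0 then [s] else []) ++ _
      rw [pvAdj_zip, pvAdj_append]
      rw [show (t.getLastD s) = (0 : Int) * 32 + (s :: t).getLastD 0 from by rw [List.getLastD_cons]; ring]
      rw [pvChain s t _ 0]
      simp [pvBlock0, List.append_assoc]
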